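-- pv_equiv track=rewrite | github.com/pypi-data/pypi-mirror-329 | packages/cdh-lava-core/cdh_lava_core-1.0.20250123-py3-none-any.whl/cdh_lava_core/youtube_service/caption_converter.py | format_sentences
-- ===== SOURCE A (Python) =====
-- def format_sentences(sentences):
--     """Format and group sentences into paragraphs"""
--     formatted = []
--     for sentence in sentences:
--         # Capitalize first letter
--         if sentence:
--             sentence = sentence.strip()
--             sentence = sentence[0].upper() + sentence[1:]
--             formatted.append(sentence)
--
--     # Group into paragraphs (3 sentences per paragraph)
--     paragraphs = []
--     for i in range(0, len(formatted), 3):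
--         paragraph = ' '.join(formatted[i:i+3])
--         if paragraph:
--             paragraphs.append(paragraph)
--
--     return paragraphs
-- ===== SOURCE B (Python) =====
-- def format_sentences(sentences):
--     """Format and group sentences into paragraphs (single fused pass)."""
--     paragraphs = []
--     buffer = []
--     for sentence in sentences:
--         if not sentence:
--             continue
--         sentence = sentence.strip()
--         buffer.append(sentence[0].upper() + sentence[1:])
--         if len(buffer) == 3:
--             paragraphs.append(' '.join(buffer))
--             buffer = []
--     if buffer:
--         paragraphs.append(' '.join(buffer))
--     return paragraphs
-- ===== Notes on version B (the rewrite author's own statement) =====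
-- stated objective: simpler
-- what changed: B fuses A's two sequential passes (build a formatted list, then re-scan it with range/slicing) into one pass that capitalizes each sentence into a 3-element buffer and flushes the buffer into a paragraph as it fills.
import Mathlib
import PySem

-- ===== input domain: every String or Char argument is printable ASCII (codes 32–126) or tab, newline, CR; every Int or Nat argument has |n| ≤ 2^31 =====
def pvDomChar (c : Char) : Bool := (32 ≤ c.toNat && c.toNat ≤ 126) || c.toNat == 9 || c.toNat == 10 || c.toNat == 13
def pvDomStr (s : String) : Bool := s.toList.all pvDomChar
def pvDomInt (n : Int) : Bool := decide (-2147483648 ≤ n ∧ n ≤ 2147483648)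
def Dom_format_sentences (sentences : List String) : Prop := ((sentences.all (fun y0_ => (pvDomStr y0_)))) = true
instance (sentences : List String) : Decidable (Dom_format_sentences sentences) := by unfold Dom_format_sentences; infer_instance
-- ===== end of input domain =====

-- B fuses A's two passes (build formatted list, then re-scan with range/slices) into one
-- buffered pass; same cost, simpler shape.

-- ===== PORT A =====
-- `t[0].upper() + t[1:]`, char-exact on ASCII: upperChar on the head, tail via the slice t[1:].
-- Python raises IndexError when t is empty (whitespace-only sentence); excluded by Pre_, port returns "".
def pyCapHead (t : String) : String :=
  match PySem.Str.pyGet? t 0 with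
  | some c => String.ofList (PySem.Chars.upperChar c :: (PySem.Str.slice t (some 1) none).toList)
  | none => ""

def format_sentences (sentences : List String) : List String :=
  let formatted : List String :=
    sentences.foldl (fun acc sentence =>
      if sentence ≠ "" then acc ++ [pyCapHead (PySem.Str.strip sentence)] else acc) []
  (PySem.List.pyRange 0 (formatted.length : Int) 3).foldl (fun paragraphs i =>
    let paragraph := PySem.Str.join " " (PySem.List.slice formatted (some i) (some (i + 3)))
    if paragraph ≠ "" then paragraphs ++ [paragraph] else paragraphs) []

-- ===== PORT B =====
-- the loop body of B, as a named helper (state: paragraphs so far, current buffer)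
def bStep (st : List String × List String) (sentence : String) : List String × List String :=
  if sentence = "" then st
  else
    let buf := st.2 ++ [pyCapHead (PySem.Str.strip sentence)]
    if buf.length = 3 then (st.1 ++ [PySem.Str.join " " buf], []) else (st.1, buf)

def format_sentences_alt (sentences : List String) : List String :=
  let st := sentences.foldl bStep ([], [])
  if st.2 ≠ [] then st.1 ++ [PySem.Str.join " " st.2] else st.1

-- ===== PRECONDITION & SPEC =====
-- Pre_ excludes sentences that are nonempty but whitespace-only: there A (and B) raise
-- IndexError on sentence[0] after strip().
def Pre_format_sentences (sentences : List String) : Prop :=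
  ∀ s ∈ sentences, s ≠ "" → PySem.Str.strip s ≠ ""
instance (sentences : List String) : Decidable (Pre_format_sentences sentences) := by
  unfold Pre_format_sentences; infer_instance

def pvWitness_format_sentences : List String := ["hello world.", "", "it works", "ok then", "bye"]

def Spec_format_sentences (sentences : List String) (out : List String) : Prop := out = format_sentences_alt sentences
instance (sentences : List String) (out : List String) : Decidable (Spec_format_sentences sentences out) := by unfold Spec_format_sentences; infer_instance

-- ===== CLAIM (what is proved, stated in full; the proofs are below) =====
def Claim_equal_format_sentences : Prop := ∀ (sentences : List String), Dom_format_sentences sentences → Pre_format_sentences sentences → Spec_format_sentences sentences (format_sentences sentences)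

-- ===== LEMMAS AND PROOFS =====

-- groups of three, joined with spaces: the common normal form of both ports
def groupJoin : List String → List String
  | [] => []
  | x :: rest => PySem.Str.join " " ((x :: rest).take 3) :: groupJoin (rest.drop 2)
termination_by l => l.length
decreasing_by simp

theorem groupJoin_ne_nil (l : List String) (h : l ≠ []) :
    groupJoin l = PySem.Str.join " " (l.take 3) :: groupJoin (l.drop 3) := by
  match l with
  | x :: rest => simp [groupJoin]

theorem join_cons_ne_empty (x : String) (l : List String) (hx : x ≠ "") :
    PySem.Str.join " " (x :: l) ≠ "" := by
  rw [Ne, ← String.toList_eq_nil_iff]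
  rw [PySem.Str.toList_join]
  simp only [List.map_cons]
  unfold PySem.Chars.join
  cases l with
  | nil => simpa [List.intercalate] using hx
  | cons y t => simp [List.intercalate, hx]

theorem pyRange3_cons (a b : Int) (h : a < b) :
    PySem.List.pyRange a b 3 = a :: PySem.List.pyRange (a + 3) b 3 := by
  rw [PySem.List.pyRange_of_pos _ _ (by norm_num), PySem.List.pyRange_of_pos _ _ (by norm_num)]
  rw [if_pos h]
  have hcnt : ((b - a + 3 - 1) / 3).toNat
      = (if a + 3 < b then ((b - (a + 3) + 3 - 1) / 3).toNat else 0) + 1 := by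
    split_ifs with h2 <;> omega
  rw [hcnt, List.range_succ_eq_map]
  simp only [List.map_cons, List.map_map]
  refine List.cons_eq_cons.mpr ⟨by push_cast; ring, ?_⟩
  apply List.map_congr_left
  intro k _
  simp [Function.comp]
  ring

theorem pyCapHead_ne_empty (t : String) (ht : t ≠ "") : pyCapHead t ≠ "" := by
  rw [Ne, ← String.toList_eq_nil_iff] at ht
  unfold pyCapHead
  cases hc : t.toList with
  | nil => exact absurd hc ht
  | cons c rest =>
    have hg : PySem.Str.pyGet? t 0 = some c := by
      rw [show (0 : Int) = ((0 : Nat) : Int) by norm_num, PySem.Str.pyGet?_natCast, hc]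
      rfl
    rw [hg]
    rw [Ne, ← String.toList_eq_nil_iff]
    simp

-- A's grouping loop computes groupJoin
theorem Aloop (f : List String) (hne : ∀ x ∈ f, x ≠ "") :
    ∀ (n j : Nat) (acc : List String), f.length - j ≤ n →
    (PySem.List.pyRange (j : Int) (f.length : Int) 3).foldl (fun paragraphs i =>
      let paragraph := PySem.Str.join " " (PySem.List.slice f (some i) (some (i + 3)))
      if paragraph ≠ "" then paragraphs ++ [paragraph] else paragraphs) acc
    = acc ++ groupJoin (f.drop j) := by
  intro n
  induction n with
  | zero =>
    intro j acc hj
    have hge : f.length ≤ j := by omega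
    rw [List.drop_eq_nil_of_le hge]
    have : PySem.List.pyRange (j : Int) (f.length : Int) 3 = [] := by
      rw [PySem.List.pyRange_of_pos _ _ (by norm_num)]
      rw [if_neg (by exact_mod_cast not_lt.mpr (by exact_mod_cast hge))]
      simp
    rw [this]
    simp [groupJoin]
  | succ n ih =>
    intro j acc hj
    by_cases hlt : j < f.length
    · rw [pyRange3_cons _ _ (by exact_mod_cast hlt)]
      rw [List.foldl_cons]
      have hslice : PySem.List.slice f (some (j : Int)) (some ((j : Int) + 3))
          = (f.drop j).take 3 := by
        have := PySem.List.slice_natCast_add f j 3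
        simpa using this
      have hdrop : f.drop j ≠ [] := by
        intro h
        have := List.drop_eq_nil_iff.mp h
        omega
      have hhead : ∃ x rest, f.drop j = x :: rest := by
        cases h : f.drop j with
        | nil => exact absurd h hdrop
        | cons x rest => exact ⟨x, rest, rfl⟩
      obtain ⟨x, rest, hx⟩ := hhead
      have hxne : x ≠ "" := hne x (by
        have : x ∈ f.drop j := by rw [hx]; exact List.mem_cons_self
        exact List.mem_of_mem_drop this)
      have hpne : PySem.Str.join " " ((f.drop j).take 3) ≠ "" := by
        rw [hx]
        cases rest with
        | nil => exact join_cons_ne_empty _ _ hxne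
        | cons y t =>
          cases t with
          | nil => exact join_cons_ne_empty _ _ hxne
          | cons z u => exact join_cons_ne_empty _ _ hxne
      simp only [hslice]
      rw [if_pos hpne]
      have h3 : ((j : Int) + 3) = (((j + 3 : Nat)) : Int) := by push_cast; ring
      rw [h3, ih (j + 3) _ (by omega)]
      rw [groupJoin_ne_nil _ hdrop]
      simp [List.drop_drop]
    · have hge : f.length ≤ j := by omega
      rw [List.drop_eq_nil_of_le hge]
      have : PySem.List.pyRange (j : Int) (f.length : Int) 3 = [] := by
        rw [PySem.List.pyRange_of_pos _ _ (by norm_num)]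
        rw [if_neg (by exact_mod_cast not_lt.mpr (by exact_mod_cast hge))]
        simp
      rw [this]
      simp [groupJoin]

-- the capitalized, empties-skipped sentence list both ports build (A materializes it, B streams it)
def capList (sentences : List String) : List String :=
  sentences.filterMap (fun s => if s = "" then none else some (pyCapHead (PySem.Str.strip s)))

-- A's first loop builds capList
theorem formatted_eq :
    ∀ (ss : List String) (acc : List String),
    ss.foldl (fun acc sentence =>
      if sentence ≠ "" then acc ++ [pyCapHead (PySem.Str.strip sentence)] else acc) acc
    = acc ++ capList ss := by
  intro ss
  induction ss with
  | nil => intro acc; simp [capList]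
  | cons s rest ih =>
    intro acc
    by_cases hs : s = ""
    · simp [capList, hs]
      simpa [capList] using ih acc
    · have ih' := ih (acc ++ [pyCapHead (PySem.Str.strip s)])
      simp only [ne_eq, ite_not] at ih'
      simp [capList, hs, ih']

-- B's buffered fold computes groupJoin of capList
theorem Bloop : ∀ (ss : List String) (paras buf : List String), buf.length < 3 →
    (let st := ss.foldl bStep (paras, buf)
     if st.2 ≠ [] then st.1 ++ [PySem.Str.join " " st.2] else st.1)
    = paras ++ groupJoin (buf ++ capList ss) := by
  intro ss
  induction ss with
  | nil =>
    intro paras buf hb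
    cases buf with
    | nil => simp [capList, groupJoin]
    | cons y ys =>
      simp only [List.foldl_nil, capList, List.filterMap_nil, List.append_nil]
      rw [if_pos (by simp)]
      rw [groupJoin_ne_nil _ (by simp)]
      rw [List.take_of_length_le (Nat.le_of_lt hb)]
      rw [List.drop_eq_nil_of_le (Nat.le_of_lt hb)]
      simp [groupJoin]
  | cons c rest ih =>
    intro paras buf hb
    simp only [List.foldl_cons]
    by_cases hc : c = ""
    · rw [show bStep (paras, buf) c = (paras, buf) from by simp [bStep, hc]]
      rw [ih paras buf hb]
      simp [capList, hc]
    · have hcap : capList (c :: rest)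
          = pyCapHead (PySem.Str.strip c) :: capList rest := by
        simp [capList, hc]
      by_cases h3 : (buf ++ [pyCapHead (PySem.Str.strip c)]).length = 3
      · rw [show bStep (paras, buf) c
            = (paras ++ [PySem.Str.join " " (buf ++ [pyCapHead (PySem.Str.strip c)])], [])
            from by simp [bStep, hc, h3]]
        rw [ih (paras ++ [PySem.Str.join " " (buf ++ [pyCapHead (PySem.Str.strip c)])]) [] (by norm_num)]
        rw [hcap]
        rw [groupJoin_ne_nil (buf ++ pyCapHead (PySem.Str.strip c) :: capList rest) (by simp)]
        have hbuf2 : buf.length = 2 := by simpa using h3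
        have htake : (buf ++ pyCapHead (PySem.Str.strip c) :: capList rest).take 3
            = buf ++ [pyCapHead (PySem.Str.strip c)] := by
          rw [show buf ++ pyCapHead (PySem.Str.strip c) :: capList rest
              = (buf ++ [pyCapHead (PySem.Str.strip c)]) ++ capList rest by simp]
          rw [List.take_append_of_le_length (by simp [hbuf2])]
          rw [List.take_of_length_le (by simp [hbuf2])]
        have hdrop : (buf ++ pyCapHead (PySem.Str.strip c) :: capList rest).drop 3
            = capList rest := by
          rw [show buf ++ pyCapHead (PySem.Str.strip c) :: capList rest
              = (buf ++ [pyCapHead (PySem.Str.strip c)]) ++ capList rest by simp]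
          rw [List.drop_append_of_le_length (by simp [hbuf2])]
          simp [hbuf2]
        rw [htake, hdrop]
        simp
      · rw [show bStep (paras, buf) c = (paras, buf ++ [pyCapHead (PySem.Str.strip c)])
            from by simp only [bStep, if_neg hc]; rw [if_neg h3]]
        rw [ih paras (buf ++ [pyCapHead (PySem.Str.strip c)]) (by simp at h3 ⊢; omega)]
        rw [hcap]
        simp

-- ===== VERDICT (by name: the statement is the Claim_ definition above) =====
theorem format_sentences_spec : Claim_equal_format_sentences := by
  intro sentences _ hpre
  unfold Spec_format_sentences format_sentences format_sentences_alt
  simp only [formatted_eq, List.nil_append]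
  have hne : ∀ x ∈ capList sentences, x ≠ "" := by
    intro x hx
    rw [capList, List.mem_filterMap] at hx
    obtain ⟨s, hs, hsx⟩ := hx
    by_cases h0 : s = ""
    · simp [h0] at hsx
    · simp [h0] at hsx
      rw [← hsx]
      exact pyCapHead_ne_empty _ (hpre s hs h0)
  have hA := Aloop (capList sentences) hne (capList sentences).length 0 [] (by omega)
  simp only [Nat.cast_zero, List.drop_zero, List.nil_append] at hA
  have hB := Bloop sentences [] [] (by norm_num)
  simp only [List.nil_append] at hB
  rw [hA]
  exact hB.symm
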